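-- pv_equiv track=rewrite | github.com/withNoclout/LeetCode-Med | quiz_minimizeSet.py | minimizeSet
-- ===== SOURCE A (Python) =====
-- def minimizeSet(divisor1, divisor2, uniqueCnt1, uniqueCnt2):
--     def gcd(a, b):
--         while b:
--             a, b = b, a % b
--         return a
--
--     lcm = (divisor1 * divisor2) // gcd(divisor1, divisor2)
--
--     left, right = 1, 10**10
--     while left < right:
--         mid = (left + right) // 2
--         cnt1 = mid - mid // divisor1
--         cnt2 = mid - mid // divisor2
--         total = mid - mid // lcm
--
--         if cnt1 >= uniqueCnt1 and cnt2 >= uniqueCnt2 and total >= uniqueCnt1 + uniqueCnt2: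
--             right = mid
--         else:
--             left = mid + 1
--     return left
-- ===== SOURCE B (Python) =====
-- def minimizeSet(divisor1, divisor2, uniqueCnt1, uniqueCnt2):
--     def gcd(a, b):
--         while b:
--             a, b = b, a % b
--         return a
--
--     lcm = (divisor1 * divisor2) // gcd(divisor1, divisor2)
--     CAP = 10 ** 10
--
--     def need(cnt, d):
--         # smallest n >= 1 whose count of non-multiples of d (n - n//d) reaches cnt, capped at CAP
--         if cnt <= 0:
--             return 1
--         if d == 1:
--             return CAP
--         return min(CAP, cnt + (cnt - 1) // (d - 1))
--
--     return max(need(uniqueCnt1, divisor1),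
--                need(uniqueCnt2, divisor2),
--                need(uniqueCnt1 + uniqueCnt2, lcm))
-- ===== Notes on version B (the rewrite author's own statement) =====
-- stated objective: faster
-- what changed: Replaces A's 34-iteration binary search over [1, 10^10] (three floor divisions per probe) with a direct closed-form threshold per constraint (k-th non-multiple formula n = cnt + (cnt-1)//(d-1), capped at 10^10), returning the max of the three thresholds.
import Mathlib
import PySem

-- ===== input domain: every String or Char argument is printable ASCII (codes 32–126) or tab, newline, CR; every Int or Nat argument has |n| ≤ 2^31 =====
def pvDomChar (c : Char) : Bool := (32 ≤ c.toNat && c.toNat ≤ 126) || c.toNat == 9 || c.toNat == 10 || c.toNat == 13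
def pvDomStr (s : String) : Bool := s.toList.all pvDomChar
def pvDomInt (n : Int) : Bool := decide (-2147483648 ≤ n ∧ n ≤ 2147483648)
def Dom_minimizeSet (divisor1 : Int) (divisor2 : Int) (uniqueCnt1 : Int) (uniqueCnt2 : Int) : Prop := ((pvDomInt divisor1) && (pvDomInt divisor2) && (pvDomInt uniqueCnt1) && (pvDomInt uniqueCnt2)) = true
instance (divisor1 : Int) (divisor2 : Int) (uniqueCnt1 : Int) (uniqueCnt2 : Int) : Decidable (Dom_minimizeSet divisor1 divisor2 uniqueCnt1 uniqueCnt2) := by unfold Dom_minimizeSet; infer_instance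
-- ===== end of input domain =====

-- B replaces A's 34-iteration binary search over [1, 10^10] by a closed-form
-- k-th-non-multiple formula per constraint (objective: faster, constant factor).

-- ===== PORT A =====
-- inner helper `gcd` (identical in Source A and Source B; shared by both ports)
def pyGcd (a b : Int) : Int :=
  if h : b ≠ 0 then pyGcd b (PySem.Int.mod a b) else a
termination_by b.natAbs
decreasing_by
  rcases lt_trichotomy b 0 with hb | hb | hb
  · have := PySem.Int.mod_neg_bounds a hb; omega
  · exact absurd hb h
  · have h1 := PySem.Int.mod_nonneg a hb
    have h2 := PySem.Int.mod_lt a hb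
    omega

-- the `while left < right` body; the three counts of A are folded into `loopCond`
def loopCond (divisor1 divisor2 lcm uniqueCnt1 uniqueCnt2 mid : Int) : Bool :=
  decide (uniqueCnt1 ≤ mid - PySem.Int.floordiv mid divisor1) &&
  decide (uniqueCnt2 ≤ mid - PySem.Int.floordiv mid divisor2) &&
  decide (uniqueCnt1 + uniqueCnt2 ≤ mid - PySem.Int.floordiv mid lcm)

def minimizeSetLoop (divisor1 divisor2 lcm uniqueCnt1 uniqueCnt2 left right : Int) : Int :=
  if h : left < right then
    if loopCond divisor1 divisor2 lcm uniqueCnt1 uniqueCnt2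
         (PySem.Int.floordiv (left + right) 2) = true then
      minimizeSetLoop divisor1 divisor2 lcm uniqueCnt1 uniqueCnt2 left
        (PySem.Int.floordiv (left + right) 2)
    else
      minimizeSetLoop divisor1 divisor2 lcm uniqueCnt1 uniqueCnt2
        (PySem.Int.floordiv (left + right) 2 + 1) right
  else left
termination_by (right - left).toNat
decreasing_by
  all_goals
    have h1 := (PySem.Int.le_floordiv_iff_mul_le
      (a := left + right) (b := 2) (q := left) (by norm_num)).mpr (by omega)
    have h2 := (PySem.Int.floordiv_lt_iff_lt_mul
      (a := left + right) (b := 2) (q := right) (by norm_num)).mpr (by omega)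
    omega

def minimizeSet (divisor1 : Int) (divisor2 : Int) (uniqueCnt1 : Int) (uniqueCnt2 : Int) : Int :=
  minimizeSetLoop divisor1 divisor2
    (PySem.Int.floordiv (divisor1 * divisor2) (pyGcd divisor1 divisor2))
    uniqueCnt1 uniqueCnt2 1 10000000000

-- ===== PORT B =====
-- smallest n ≥ 1 whose count of non-multiples of d reaches cnt, capped at 10^10
def pyNeed (cnt d : Int) : Int :=
  if cnt ≤ 0 then 1
  else if d = 1 then 10000000000
  else min 10000000000 (cnt + PySem.Int.floordiv (cnt - 1) (d - 1))

def minimizeSet_alt (divisor1 : Int) (divisor2 : Int) (uniqueCnt1 : Int) (uniqueCnt2 : Int) : Int :=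
  max (pyNeed uniqueCnt1 divisor1)
    (max (pyNeed uniqueCnt2 divisor2)
      (pyNeed (uniqueCnt1 + uniqueCnt2)
        (PySem.Int.floordiv (divisor1 * divisor2) (pyGcd divisor1 divisor2))))

-- ===== PRECONDITION & SPEC =====
-- Pre_ excludes exactly the inputs where A raises ZeroDivisionError: a zero divisor.
def Pre_minimizeSet (divisor1 : Int) (divisor2 : Int) (uniqueCnt1 : Int) (uniqueCnt2 : Int) : Prop :=
  divisor1 ≠ 0 ∧ divisor2 ≠ 0
instance (divisor1 : Int) (divisor2 : Int) (uniqueCnt1 : Int) (uniqueCnt2 : Int) : Decidable (Pre_minimizeSet divisor1 divisor2 uniqueCnt1 uniqueCnt2) := by unfold Pre_minimizeSet; infer_instance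
def pvWitness_minimizeSet : Int × Int × Int × Int := (3, 5, 2, 2)

def Spec_minimizeSet (divisor1 : Int) (divisor2 : Int) (uniqueCnt1 : Int) (uniqueCnt2 : Int) (out : Int) : Prop := out = minimizeSet_alt divisor1 divisor2 uniqueCnt1 uniqueCnt2
instance (divisor1 : Int) (divisor2 : Int) (uniqueCnt1 : Int) (uniqueCnt2 : Int) (out : Int) : Decidable (Spec_minimizeSet divisor1 divisor2 uniqueCnt1 uniqueCnt2 out) := by unfold Spec_minimizeSet; infer_instance

-- ===== CLAIM (what is proved, stated in full; the proofs are below) =====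
def Claim_equal_minimizeSet : Prop := ∀ (divisor1 : Int) (divisor2 : Int) (uniqueCnt1 : Int) (uniqueCnt2 : Int), Dom_minimizeSet divisor1 divisor2 uniqueCnt1 uniqueCnt2 → Pre_minimizeSet divisor1 divisor2 uniqueCnt1 uniqueCnt2 → Spec_minimizeSet divisor1 divisor2 uniqueCnt1 uniqueCnt2 (minimizeSet divisor1 divisor2 uniqueCnt1 uniqueCnt2)

-- ===== LEMMAS AND PROOFS =====

lemma fdiv_mul_le {d : Int} (hd : 0 < d) (a : Int) :
    PySem.Int.floordiv a d * d ≤ a :=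
  (PySem.Int.le_floordiv_iff_mul_le hd).mp le_rfl

lemma lt_fdiv_succ_mul {d : Int} (hd : 0 < d) (a : Int) :
    a < (PySem.Int.floordiv a d + 1) * d :=
  (PySem.Int.floordiv_lt_iff_lt_mul hd).mp (lt_add_one _)

lemma fdiv_neg_flip (a d : Int) :
    PySem.Int.floordiv a d = PySem.Int.floordiv (-a) (-d) := by
  have h := PySem.Int.floordiv_neg_neg (-a) (-d)
  simp only [neg_neg] at h
  exact h

-- with d ≠ 0, quotients move at most as fast as the numerator
lemma fdiv_mono_diff {d : Int} (hd : d ≠ 0) {a b : Int} (hab : a ≤ b) :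
    PySem.Int.floordiv b d - PySem.Int.floordiv a d ≤ b - a := by
  rcases lt_or_gt_of_ne hd with hneg | hpos
  · -- negative divisor: the quotient is antitone in the numerator
    rw [fdiv_neg_flip a d, fdiv_neg_flip b d]
    have hd' : (0 : Int) < -d := by omega
    have hmono : PySem.Int.floordiv (-b) (-d) ≤ PySem.Int.floordiv (-a) (-d) :=
      (PySem.Int.le_floordiv_iff_mul_le hd').mpr
        (le_trans (fdiv_mul_le hd' (-b)) (by omega))
    omega
  · have h1 := fdiv_mul_le hpos a
    have h2 := lt_fdiv_succ_mul hpos a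
    have : PySem.Int.floordiv b d < PySem.Int.floordiv a d + (b - a) + 1 := by
      rw [PySem.Int.floordiv_lt_iff_lt_mul hpos]
      nlinarith [mul_le_mul_of_nonneg_left (by omega : (1:Int) ≤ d) (by omega : (0:Int) ≤ b - a)]
    omega

-- characterisation: for any nonzero divisor, at points 1 ≤ n < 10^10 the
-- constraint of A holds iff n has reached B's closed-form threshold
lemma need_iff (d c n : Int) (hd : d ≠ 0) (hc : c ≤ 4294967296)
    (hn1 : 1 ≤ n) (hnC : n < 10000000000) :
    (c ≤ n - PySem.Int.floordiv n d) ↔ pyNeed c d ≤ n := by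
  unfold pyNeed
  by_cases hc0 : c ≤ 0
  · simp only [if_pos hc0]
    constructor
    · intro _; omega
    · intro _
      -- n - n//d is nonnegative for n ≥ 1
      rcases lt_or_gt_of_ne hd with hneg | hpos
      · rw [fdiv_neg_flip n d]
        have hd' : (0 : Int) < -d := by omega
        have h1 := fdiv_mul_le hd' (-n)
        nlinarith [lt_fdiv_succ_mul hd' (-n)]
      · have h1 := fdiv_mul_le hpos n
        nlinarith [lt_fdiv_succ_mul hpos n]
  · rw [if_neg hc0]
    by_cases hd1 : d = 1
    · subst hd1
      rw [if_pos rfl]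
      have hfd : PySem.Int.floordiv n 1 = n :=
        (PySem.Int.floordiv_eq_iff_of_pos (by norm_num)).mpr (by omega)
      rw [hfd]
      constructor
      · intro h; omega
      · intro h; omega
    · rw [if_neg hd1]
      rcases lt_or_gt_of_ne hd with hneg | hpos
      · -- d ≤ -1 : use the mirrored quotient q = (1-c)//(1-d) with 1-d ≥ 2
        have hq' : PySem.Int.floordiv (c - 1) (d - 1) = PySem.Int.floordiv (1 - c) (1 - d) := by
          have h := PySem.Int.floordiv_neg_neg (1 - c) (1 - d)
          rw [show -(1 - c) = c - 1 by ring, show -(1 - d) = d - 1 by ring] at h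
          exact h
        rw [hq']
        set q := PySem.Int.floordiv (1 - c) (1 - d) with hqdef
        have hE : (0 : Int) < 1 - d := by omega
        have H1 : q * (1 - d) ≤ 1 - c := fdiv_mul_le hE (1 - c)
        have H2 : 1 - c < (q + 1) * (1 - d) := lt_fdiv_succ_mul hE (1 - c)
        have hq0 : q ≤ 0 := by
          have : q < 1 := by rw [hqdef, PySem.Int.floordiv_lt_iff_lt_mul hE]; omega
          omega
        have hq1c : 1 - c ≤ q := by
          rw [hqdef, PySem.Int.le_floordiv_iff_mul_le hE]
          nlinarith
        have hm1 : 1 ≤ c + q := by omega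
        have hmCAP : c + q ≤ 10000000000 := by omega
        rw [min_eq_right hmCAP]
        -- key1 : at m = c + q the count has reached c
        have key1 : c ≤ (c + q) - PySem.Int.floordiv (c + q) d := by
          have : PySem.Int.floordiv (c + q) d ≤ q := by
            rw [fdiv_neg_flip (c + q) d]
            have hd' : (0 : Int) < -d := by omega
            have : PySem.Int.floordiv (-(c + q)) (-d) < q + 1 := by
              rw [PySem.Int.floordiv_lt_iff_lt_mul hd']
              nlinarith
            omega
          omega
        -- key2 : at m - 1 the count is still below c
        have key2 : (c + q - 1) - PySem.Int.floordiv (c + q - 1) d ≤ c - 1 := by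
          have : q ≤ PySem.Int.floordiv (c + q - 1) d := by
            rw [fdiv_neg_flip (c + q - 1) d]
            have hd' : (0 : Int) < -d := by omega
            rw [PySem.Int.le_floordiv_iff_mul_le hd']
            nlinarith
          omega
        constructor
        · intro h
          by_contra hlt
          have hle : n ≤ c + q - 1 := by omega
          have := fdiv_mono_diff hd hle
          omega
        · intro h
          have := fdiv_mono_diff hd (show c + q ≤ n by omega)
          omega
      · -- d ≥ 2
        have hd2 : 2 ≤ d := by omega
        set q := PySem.Int.floordiv (c - 1) (d - 1) with hqdef
        have hE : (0 : Int) < d - 1 := by omega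
        have H1 : q * (d - 1) ≤ c - 1 := fdiv_mul_le hE (c - 1)
        have H2 : c - 1 < (q + 1) * (d - 1) := lt_fdiv_succ_mul hE (c - 1)
        have hq0 : 0 ≤ q := by
          rw [hqdef, PySem.Int.le_floordiv_iff_mul_le hE]; omega
        have hqc : q ≤ c - 1 := by nlinarith
        have hmCAP : c + q ≤ 10000000000 := by omega
        rw [min_eq_right hmCAP]
        have key1 : c ≤ (c + q) - PySem.Int.floordiv (c + q) d := by
          have : PySem.Int.floordiv (c + q) d ≤ q := by
            have : PySem.Int.floordiv (c + q) d < q + 1 := by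
              rw [PySem.Int.floordiv_lt_iff_lt_mul hpos]
              nlinarith
            omega
          omega
        have key2 : (c + q - 1) - PySem.Int.floordiv (c + q - 1) d ≤ c - 1 := by
          have : q ≤ PySem.Int.floordiv (c + q - 1) d := by
            rw [PySem.Int.le_floordiv_iff_mul_le hpos]
            nlinarith
          omega
        constructor
        · intro h
          by_contra hlt
          have hle : n ≤ c + q - 1 := by omega
          have := fdiv_mono_diff hd hle
          omega
        · intro h
          have := fdiv_mono_diff hd (show c + q ≤ n by omega)
          omega

lemma pyNeed_bounds (c d : Int) (hd : d ≠ 0) (hc : c ≤ 4294967296) :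
    1 ≤ pyNeed c d ∧ pyNeed c d ≤ 10000000000 := by
  unfold pyNeed
  by_cases hc0 : c ≤ 0
  · simp [hc0]
  · rw [if_neg hc0]
    by_cases hd1 : d = 1
    · simp [hd1]
    · rw [if_neg hd1]
      refine ⟨?_, min_le_left _ _⟩
      rcases lt_or_gt_of_ne hd with hneg | hpos
      · have hE : (0 : Int) < 1 - d := by omega
        have hq1c : 1 - c ≤ PySem.Int.floordiv (1 - c) (1 - d) := by
          rw [PySem.Int.le_floordiv_iff_mul_le hE]; nlinarith
        have hq' : PySem.Int.floordiv (c - 1) (d - 1) = PySem.Int.floordiv (1 - c) (1 - d) := by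
          have h := PySem.Int.floordiv_neg_neg (1 - c) (1 - d)
          rw [show -(1 - c) = c - 1 by ring, show -(1 - d) = d - 1 by ring] at h
          exact h
        rw [hq']; omega
      · have hE : (0 : Int) < d - 1 := by omega
        have hq0 : 0 ≤ PySem.Int.floordiv (c - 1) (d - 1) := by
          rw [PySem.Int.le_floordiv_iff_mul_le hE]; omega
        omega

lemma pyGcd_dvd (a b : Int) : pyGcd a b ∣ a ∧ pyGcd a b ∣ b := by
  induction a, b using pyGcd.induct with
  | case1 a b h ih =>
    rw [pyGcd, dif_pos h]
    obtain ⟨ihb, ihr⟩ := ih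
    refine ⟨?_, ihb⟩
    have hsplit := PySem.Int.floordiv_mul_add_mod a b
    calc pyGcd b (PySem.Int.mod a b) ∣
        PySem.Int.floordiv a b * b + PySem.Int.mod a b :=
          dvd_add (Dvd.dvd.mul_left ihb _) ihr
      _ = a := hsplit
  | case2 a b h =>
    rw [pyGcd, dif_neg h]
    have hb0 : b = 0 := by omega
    exact ⟨dvd_refl a, hb0 ▸ dvd_zero a⟩

lemma pyGcd_ne_zero (a b : Int) (h : a ≠ 0 ∨ b ≠ 0) : pyGcd a b ≠ 0 := by
  induction a, b using pyGcd.induct with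
  | case1 a b hb ih =>
    rw [pyGcd, dif_pos hb]
    exact ih (Or.inl hb)
  | case2 a b hb =>
    rw [pyGcd, dif_neg hb]
    have hb0 : b = 0 := by omega
    rcases h with h | h
    · exact h
    · exact absurd hb0 h

-- the binary search of A converges to N whenever the condition is false
-- strictly below N and true from N up to the right end
lemma loop_eq (d1 d2 l c1 c2 N : Int) (k : Nat) :
    ∀ left right : Int, (right - left).toNat = k →
    left ≤ N → N ≤ right →
    (∀ x, left ≤ x → x < N → loopCond d1 d2 l c1 c2 x ≠ true) →
    (∀ x, N ≤ x → x < right → loopCond d1 d2 l c1 c2 x = true) →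
    minimizeSetLoop d1 d2 l c1 c2 left right = N := by
  induction k using Nat.strong_induction_on with
  | _ k ih =>
    intro left right hk hlN hNr hbelow habove
    rw [minimizeSetLoop]
    by_cases hlr : left < right
    · rw [dif_pos hlr]
      have hmlo : left ≤ PySem.Int.floordiv (left + right) 2 :=
        (PySem.Int.le_floordiv_iff_mul_le (by norm_num)).mpr (by omega)
      have hmhi : PySem.Int.floordiv (left + right) 2 < right :=
        (PySem.Int.floordiv_lt_iff_lt_mul (by norm_num)).mpr (by omega)
      by_cases hP : loopCond d1 d2 l c1 c2 (PySem.Int.floordiv (left + right) 2) = true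
      · rw [if_pos hP]
        have hNmid : N ≤ PySem.Int.floordiv (left + right) 2 := by
          by_contra hcon
          exact hbelow _ hmlo (by omega) hP
        exact ih (PySem.Int.floordiv (left + right) 2 - left).toNat (by omega)
          left _ rfl hlN hNmid hbelow (fun x hx1 hx2 => habove x hx1 (by omega))
      · rw [if_neg hP]
        have hmidN : PySem.Int.floordiv (left + right) 2 < N := by
          by_contra hcon
          exact hP (habove _ (by omega) hmhi)
        exact ih (right - (PySem.Int.floordiv (left + right) 2 + 1)).toNat (by omega)
          _ right rfl (by omega) hNr (fun x hx1 hx2 => hbelow x (by omega) hx2) habove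
    · rw [dif_neg hlr]
      omega

lemma loopCond_iff (d1 d2 l c1 c2 x : Int) :
    loopCond d1 d2 l c1 c2 x = true ↔
      (c1 ≤ x - PySem.Int.floordiv x d1 ∧ c2 ≤ x - PySem.Int.floordiv x d2 ∧
       c1 + c2 ≤ x - PySem.Int.floordiv x l) := by
  simp [loopCond, and_assoc]

-- ===== VERDICT (by name: the statement is the Claim_ definition above) =====
theorem minimizeSet_spec : Claim_equal_minimizeSet := by
  intro d1 d2 c1 c2 hdom hpre
  obtain ⟨hd1, hd2⟩ := hpre
  unfold Dom_minimizeSet at hdom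
  simp only [pvDomInt, Bool.and_eq_true, decide_eq_true_eq] at hdom
  obtain ⟨⟨⟨hb1, hb2⟩, hb3⟩, hb4⟩ := hdom
  unfold Spec_minimizeSet minimizeSet minimizeSet_alt
  set g := pyGcd d1 d2 with hgdef
  set l := PySem.Int.floordiv (d1 * d2) g with hldef
  have hg0 : g ≠ 0 := pyGcd_ne_zero d1 d2 (Or.inl hd1)
  have hgd : g ∣ d1 * d2 := Dvd.dvd.mul_right (pyGcd_dvd d1 d2).1 d2
  have hlg : l * g = d1 * d2 := by
    have hsplit := PySem.Int.floordiv_mul_add_mod (d1 * d2) g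
    rw [(PySem.Int.mod_eq_zero_iff_dvd _ _).mpr hgd, ← hldef] at hsplit
    linarith
  have hl0 : l ≠ 0 := by
    intro h
    rw [h, zero_mul] at hlg
    rcases mul_eq_zero.mp hlg.symm with h' | h' <;> [exact hd1 h'; exact hd2 h']
  set N := max (pyNeed c1 d1) (max (pyNeed c2 d2) (pyNeed (c1 + c2) l)) with hNdef
  have hB1 := pyNeed_bounds c1 d1 hd1 (by omega)
  have hB2 := pyNeed_bounds c2 d2 hd2 (by omega)
  have hB3 := pyNeed_bounds (c1 + c2) l hl0 (by omega)
  have hN1 : 1 ≤ N := by omega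
  have hNC : N ≤ 10000000000 := by omega
  refine loop_eq d1 d2 l c1 c2 N 9999999999 1 10000000000 (by rfl)
    hN1 hNC ?_ ?_
  · intro x hx1 hxN hcond
    rw [loopCond_iff] at hcond
    obtain ⟨hc1, hc2, hc3⟩ := hcond
    have hxC : x < 10000000000 := by omega
    have k1 := (need_iff d1 c1 x hd1 (by omega) hx1 hxC).mp hc1
    have k2 := (need_iff d2 c2 x hd2 (by omega) hx1 hxC).mp hc2
    have k3 := (need_iff l (c1 + c2) x hl0 (by omega) hx1 hxC).mp hc3
    omega
  · intro x hxN hxC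
    rw [loopCond_iff]
    have hx1 : 1 ≤ x := by omega
    refine ⟨?_, ?_, ?_⟩
    · exact (need_iff d1 c1 x hd1 (by omega) hx1 hxC).mpr (by omega)
    · exact (need_iff d2 c2 x hd2 (by omega) hx1 hxC).mpr (by omega)
    · exact (need_iff l (c1 + c2) x hl0 (by omega) hx1 hxC).mpr (by omega)
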